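-- pv_equiv track=rewrite | github.com/arquejadalucy/challenges | idle_drives.py | numIdleDrives
-- ===== SOURCE A (Python) =====
-- def numIdleDrives(x, y):
--     # Write your code here
--     rows = len(x)
--     cols = len(y)
--     idle_robots = 0
--
--     for r in range(rows):
--         xr = x[r]
--         yr = y[r]
--         has_robot_above = False
--         has_robot_below = False
--         has_robot_left = False
--         has_robot_right = False
--
--         for c in range(cols):
--             if r != c:
--                 xc = x[c]
--                 yc = y[c]
--                 if xc == xr and yc == yr + 1:
--                     has_robot_above = True
--                 if xc == xr and yc == yr - 1:
--                     has_robot_below = True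
--                 if xc == xr - 1 and yc == yr:
--                     has_robot_left = True
--                 if xc == xr + 1 and yc == yr:
--                     has_robot_right = True
--             if has_robot_above and has_robot_right \
--                     and has_robot_below and has_robot_left:
--                 idle_robots += 1
--     return idle_robots
-- ===== SOURCE B (Python) =====
-- def numIdleDrives(x, y):
--     robots = set(zip(x, y))
--     idle = 0
--     for px, py in zip(x, y):
--         if ((px, py + 1) in robots and (px, py - 1) in robots
--                 and (px - 1, py) in robots and (px + 1, py) in robots):
--             idle += 1
--     return idle
-- ===== Notes on version B (the rewrite author's own statement) =====
-- stated objective: faster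
-- what changed: Replaces the quadratic nested neighbour scan with sticky flags by a set of positions built once and one O(1) four-neighbour membership test per robot, counting each surrounded robot exactly once.
-- intended difference: On inputs where some robot's four axis-neighbours all occur before the last list position, A over-counts (its counter is incremented once per remaining inner-loop iteration after the fourth flag is set, e.g. 2 at the witness), while B returns the number of surrounded robots (1 there), which is the intended count. — e.g. on numIdleDrives([0, 0, 1, -1, 0], [1, -1, 0, 0, 0]): A returns 2, B returns 1
import Mathlib
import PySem

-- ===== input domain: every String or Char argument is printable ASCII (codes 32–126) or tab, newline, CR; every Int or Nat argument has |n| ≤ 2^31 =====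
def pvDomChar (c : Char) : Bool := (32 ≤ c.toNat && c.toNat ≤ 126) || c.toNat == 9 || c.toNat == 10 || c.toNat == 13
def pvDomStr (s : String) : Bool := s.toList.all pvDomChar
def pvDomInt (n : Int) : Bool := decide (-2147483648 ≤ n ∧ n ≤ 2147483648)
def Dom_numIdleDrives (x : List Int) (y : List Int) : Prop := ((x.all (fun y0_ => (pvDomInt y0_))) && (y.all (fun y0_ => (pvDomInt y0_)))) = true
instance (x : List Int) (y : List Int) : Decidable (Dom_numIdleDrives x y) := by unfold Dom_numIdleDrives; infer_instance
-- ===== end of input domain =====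

-- B builds the set of robot positions once and counts the robots whose four axis-neighbours
-- are present (O(n) vs A's O(n^2)); where A's sticky-flag counter over-counts, B returns the
-- number of surrounded robots (stated as the intended difference D_ below).

-- ===== PORT A =====
-- inner-loop body of A's 'for c in range(cols)': state = (four flags, idle_robots)
def pvAStep (x y : List Int) (xr yr r : Int)
    (s : (Bool × Bool × Bool × Bool) × Int) (c : Int) : (Bool × Bool × Bool × Bool) × Int :=
  let fl :=
    if r ≠ c then
      let xc := PySem.List.pyGetD x c 0
      let yc := PySem.List.pyGetD y c 0
      (s.1.1 || (xc == xr && yc == yr + 1),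
       s.1.2.1 || (xc == xr && yc == yr - 1),
       s.1.2.2.1 || (xc == xr - 1 && yc == yr),
       s.1.2.2.2 || (xc == xr + 1 && yc == yr))
    else s.1
  (fl, if fl.1 && fl.2.2.2 && fl.2.1 && fl.2.2.1 then s.2 + 1 else s.2)

def numIdleDrives (x : List Int) (y : List Int) : Int :=
  let rows : Int := x.length
  let cols : Int := y.length
  (PySem.List.pyRange 0 rows 1).foldl (fun idle r =>
    let xr := PySem.List.pyGetD x r 0
    let yr := PySem.List.pyGetD y r 0
    ((PySem.List.pyRange 0 cols 1).foldl (pvAStep x y xr yr r)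
      ((false, false, false, false), idle)).2) 0

-- ===== PORT B =====
def numIdleDrives_alt (x : List Int) (y : List Int) : Int :=
  let robots : PySem.Set (Int × Int) := PySem.Set.ofList (x.zip y)
  (x.zip y).foldl (fun idle p =>
    if PySem.Set.contains robots (p.1, p.2 + 1) && PySem.Set.contains robots (p.1, p.2 - 1) &&
       PySem.Set.contains robots (p.1 - 1, p.2) && PySem.Set.contains robots (p.1 + 1, p.2)
    then idle + 1 else idle) 0

-- ===== PRECONDITION & SPEC =====
-- Pre_ excludes exactly the inputs where A raises IndexError (len(x) ≠ len(y) with x nonempty).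
def Pre_numIdleDrives (x : List Int) (y : List Int) : Prop := x.length = y.length ∨ x = []
instance (x : List Int) (y : List Int) : Decidable (Pre_numIdleDrives x y) := by
  unfold Pre_numIdleDrives; infer_instance

def pvWitness_numIdleDrives : List Int × List Int := ([0, 0, 0, 1, -1], [0, 1, -1, 0, 0])

-- On inputs where some robot's four axis-neighbours all occur before the last list position, A
-- over-counts (one increment per remaining inner iteration after the fourth flag is set), while
-- B returns the number of surrounded robots, the intended count.
def D_numIdleDrives (x : List Int) (y : List Int) : Prop :=
  ∃ p ∈ x.zip y, ∀ o ∈ [((1 : Int), 0), (0, 1)],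
    [p + o, p - o] ⊆ (x.zip y).dropLast
instance (x : List Int) (y : List Int) : Decidable (D_numIdleDrives x y) := by
  unfold D_numIdleDrives; infer_instance

def Spec_numIdleDrives (x : List Int) (y : List Int) (out : Int) : Prop :=
  ¬ D_numIdleDrives x y → out = numIdleDrives_alt x y
instance (x : List Int) (y : List Int) (out : Int) : Decidable (Spec_numIdleDrives x y out) := by
  unfold Spec_numIdleDrives; infer_instance

def pvDiffWitness_numIdleDrives : List Int × List Int := ([0, 0, 1, -1, 0], [1, -1, 0, 0, 0])
def pvDiffWitnessOut_numIdleDrives : Int × Int := (2, 1)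

-- ===== CLAIM (what is proved, stated in full; the proofs are below) =====
def Claim_unchanged_numIdleDrives : Prop := ∀ (x : List Int) (y : List Int), Dom_numIdleDrives x y → Pre_numIdleDrives x y → Spec_numIdleDrives x y (numIdleDrives x y)
def Claim_changed_numIdleDrives : Prop := Dom_numIdleDrives (pvDiffWitness_numIdleDrives.1) (pvDiffWitness_numIdleDrives.2) ∧ Pre_numIdleDrives (pvDiffWitness_numIdleDrives.1) (pvDiffWitness_numIdleDrives.2) ∧ D_numIdleDrives (pvDiffWitness_numIdleDrives.1) (pvDiffWitness_numIdleDrives.2) ∧ numIdleDrives (pvDiffWitness_numIdleDrives.1) (pvDiffWitness_numIdleDrives.2) = pvDiffWitnessOut_numIdleDrives.1 ∧ numIdleDrives_alt (pvDiffWitness_numIdleDrives.1) (pvDiffWitness_numIdleDrives.2) = pvDiffWitnessOut_numIdleDrives.2 ∧ pvDiffWitnessOut_numIdleDrives.1 ≠ pvDiffWitnessOut_numIdleDrives.2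
def Claim_exact_numIdleDrives : Prop := ∀ (x : List Int) (y : List Int), Dom_numIdleDrives x y → Pre_numIdleDrives x y → D_numIdleDrives x y → numIdleDrives x y ≠ numIdleDrives_alt x y

-- ===== LEMMAS AND PROOFS =====

-- the robot's pair of coordinates at index c
def pvPt (x y : List Int) (c : Int) : Int × Int := (PySem.List.pyGetD x c 0, PySem.List.pyGetD y c 0)

-- first index (over the column range) holding position q
def pvFind (x y : List Int) (q : Int × Int) : Option Int :=
  (PySem.List.pyRange 0 (y.length : Int) 1).find? (fun c => pvPt x y c == q)

-- A's contribution for row r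
def pvCA (x y : List Int) (r : Int) : Int :=
  match pvFind x y ((pvPt x y r).1, (pvPt x y r).2 + 1),
        pvFind x y ((pvPt x y r).1, (pvPt x y r).2 - 1),
        pvFind x y ((pvPt x y r).1 - 1, (pvPt x y r).2),
        pvFind x y ((pvPt x y r).1 + 1, (pvPt x y r).2) with
  | some a, some b, some l, some t => (y.length : Int) - max (max (max a b) l) t
  | _, _, _, _ => 0

-- B's contribution for row r
def pvCB (x y : List Int) (r : Int) : Int :=
  match pvFind x y ((pvPt x y r).1, (pvPt x y r).2 + 1),
        pvFind x y ((pvPt x y r).1, (pvPt x y r).2 - 1),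
        pvFind x y ((pvPt x y r).1 - 1, (pvPt x y r).2),
        pvFind x y ((pvPt x y r).1 + 1, (pvPt x y r).2) with
  | some _, some _, some _, some _ => 1
  | _, _, _, _ => 0

-- flag-only part of pvAStep
def pvUpd (x y : List Int) (xr yr r : Int) (f : Bool × Bool × Bool × Bool) (c : Int) :
    Bool × Bool × Bool × Bool :=
  if r ≠ c then
    let xc := PySem.List.pyGetD x c 0
    let yc := PySem.List.pyGetD y c 0
    (f.1 || (xc == xr && yc == yr + 1), f.2.1 || (xc == xr && yc == yr - 1),
     f.2.2.1 || (xc == xr - 1 && yc == yr), f.2.2.2 || (xc == xr + 1 && yc == yr))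
  else f

def pvCond (f : Bool × Bool × Bool × Bool) : Bool := f.1 && f.2.2.2 && f.2.1 && f.2.2.1

-- count of inner-loop iterations that increment idle_robots, starting from flags f
def pvG (x y : List Int) (xr yr r : Int) (f : Bool × Bool × Bool × Bool) : List Int → Int
  | [] => 0
  | c :: cs =>
      (if pvCond (pvUpd x y xr yr r f c) then 1 else 0) + pvG x y xr yr r (pvUpd x y xr yr r f c) cs

-- the four neighbour predicates, with A's 'r != c' guard
def pQa (x y : List Int) (xr yr r c : Int) : Bool :=
  decide (r ≠ c) && (PySem.List.pyGetD x c 0 == xr && PySem.List.pyGetD y c 0 == yr + 1)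
def pQb (x y : List Int) (xr yr r c : Int) : Bool :=
  decide (r ≠ c) && (PySem.List.pyGetD x c 0 == xr && PySem.List.pyGetD y c 0 == yr - 1)
def pQl (x y : List Int) (xr yr r c : Int) : Bool :=
  decide (r ≠ c) && (PySem.List.pyGetD x c 0 == xr - 1 && PySem.List.pyGetD y c 0 == yr)
def pQt (x y : List Int) (xr yr r c : Int) : Bool :=
  decide (r ≠ c) && (PySem.List.pyGetD x c 0 == xr + 1 && PySem.List.pyGetD y c 0 == yr)

theorem pvAStep_eq (x y : List Int) (xr yr r : Int) (f : Bool × Bool × Bool × Bool) (n c : Int) :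
    pvAStep x y xr yr r (f, n) c =
      (pvUpd x y xr yr r f c, if pvCond (pvUpd x y xr yr r f c) then n + 1 else n) := by
  by_cases h : r = c <;> simp [pvAStep, pvUpd, pvCond, h]

theorem pvFold_eq (x y : List Int) (xr yr r : Int) :
    ∀ (cs : List Int) (f : Bool × Bool × Bool × Bool) (n : Int),
      cs.foldl (pvAStep x y xr yr r) (f, n) =
        (cs.foldl (pvUpd x y xr yr r) f, n + pvG x y xr yr r f cs)
  | [], f, n => by simp [pvG]
  | c :: cs, f, n => by
      simp only [List.foldl_cons, pvAStep_eq, pvFold_eq x y xr yr r cs, pvG]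
      rw [Prod.mk.injEq]
      exact ⟨rfl, by split <;> ring⟩

theorem pvProj_foldl (x y : List Int) (xr yr r : Int)
    (π : Bool × Bool × Bool × Bool → Bool) (p : Int → Bool)
    (hπ : ∀ f c, π (pvUpd x y xr yr r f c) = (π f || p c)) :
    ∀ (cs : List Int) (f : Bool × Bool × Bool × Bool),
      π (cs.foldl (pvUpd x y xr yr r) f) = (π f || cs.any p)
  | [], f => by simp
  | c :: cs, f => by
      simp only [List.foldl_cons, List.any_cons, pvProj_foldl x y xr yr r π p hπ cs, hπ,
        Bool.or_assoc]

theorem pvG_append (x y : List Int) (xr yr r : Int) :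
    ∀ (cs1 cs2 : List Int) (f : Bool × Bool × Bool × Bool),
      pvG x y xr yr r f (cs1 ++ cs2) =
        pvG x y xr yr r f cs1 + pvG x y xr yr r (cs1.foldl (pvUpd x y xr yr r) f) cs2
  | [], cs2, f => by simp [pvG]
  | c :: cs1, cs2, f => by
      simp only [List.cons_append, pvG, List.foldl_cons, pvG_append x y xr yr r cs1 cs2]
      ring

theorem pvCond_eq_true (f : Bool × Bool × Bool × Bool) (h : pvCond f = true) :
    f = (true, true, true, true) := by revert h; revert f; decide

theorem pvCond_upd (x y : List Int) (xr yr r : Int) (f : Bool × Bool × Bool × Bool) (c : Int)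
    (h : pvCond f = true) : pvCond (pvUpd x y xr yr r f c) = true := by
  rw [pvCond_eq_true f h]
  by_cases hc : r = c <;> simp [pvUpd, pvCond, hc]

theorem pvG_sat (x y : List Int) (xr yr r : Int) :
    ∀ (cs : List Int) (f : Bool × Bool × Bool × Bool), pvCond f = true →
      pvG x y xr yr r f cs = (cs.length : Int)
  | [], f, _ => by simp [pvG]
  | c :: cs, f, h => by
      have h' := pvCond_upd x y xr yr r f c h
      simp only [pvG, h', if_true, pvG_sat x y xr yr r cs _ h', List.length_cons]
      push_cast; ring

theorem pvG_zero (x y : List Int) (xr yr r : Int)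
    (π : Bool × Bool × Bool × Bool → Bool) (p : Int → Bool)
    (hπ : ∀ f c, π (pvUpd x y xr yr r f c) = (π f || p c))
    (himp : ∀ f, pvCond f = true → π f = true) :
    ∀ (cs : List Int) (f : Bool × Bool × Bool × Bool), π f = false →
      (∀ c ∈ cs, p c = false) → pvG x y xr yr r f cs = 0
  | [], f, _, _ => by simp [pvG]
  | c :: cs, f, hf, hp => by
      have hπ' : π (pvUpd x y xr yr r f c) = false := by
        rw [hπ, hf, hp c (List.mem_cons_self)]; rfl
      have hcond : pvCond (pvUpd x y xr yr r f c) = false := by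
        rcases hb : pvCond (pvUpd x y xr yr r f c) with _ | _
        · rfl
        · have := himp _ hb
          rw [hπ'] at this; exact absurd this (by simp)
      simp only [pvG, hcond, Bool.false_eq_true, if_false, zero_add]
      exact pvG_zero x y xr yr r π p hπ himp cs _ hπ' (fun c' hc' => hp c' (List.mem_cons_of_mem _ hc'))

-- first-occurrence minimality of find? on a strictly increasing list
theorem pvFind?_min {p : Int → Bool} {v : Int} :
    ∀ {l : List Int}, l.Pairwise (· < ·) → l.find? p = some v →
      ∀ c ∈ l, c < v → p c = false
  | [], _, h => by simp at h
  | a :: l, hpw, h => by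
      intro c hc hcv
      rcases List.pairwise_cons.mp hpw with ⟨ha, hpw'⟩
      by_cases hpa : p a
      · have hva : v = a := by
          rw [List.find?_cons_of_pos hpa] at h
          exact (Option.some_inj.mp h).symm
        rcases List.mem_cons.mp hc with rfl | hcl
        · exact absurd hcv (by omega)
        · exact absurd (ha c hcl) (by omega)
      · rw [List.find?_cons_of_neg hpa] at h
        rcases List.mem_cons.mp hc with rfl | hcl
        · simpa using hpa
        · exact pvFind?_min hpw' h c hcl hcv

-- the guarded predicates coincide with plain point-equality (the guard never fires at c = r)
theorem pQa_eq (x y : List Int) (r c : Int) :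
    pQa x y (PySem.List.pyGetD x r 0) (PySem.List.pyGetD y r 0) r c =
      (pvPt x y c == (PySem.List.pyGetD x r 0, PySem.List.pyGetD y r 0 + 1)) := by
  by_cases h : r = c
  · subst h; simp [pQa, pvPt, Prod.ext_iff]
  · simp only [pQa, pvPt, h, ne_eq, not_false_eq_true, decide_true, Bool.true_and]; rfl

theorem pQb_eq (x y : List Int) (r c : Int) :
    pQb x y (PySem.List.pyGetD x r 0) (PySem.List.pyGetD y r 0) r c =
      (pvPt x y c == (PySem.List.pyGetD x r 0, PySem.List.pyGetD y r 0 - 1)) := by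
  by_cases h : r = c
  · subst h; simp [pQb, pvPt, Prod.ext_iff]; omega
  · simp only [pQb, pvPt, h, ne_eq, not_false_eq_true, decide_true, Bool.true_and]; rfl

theorem pQl_eq (x y : List Int) (r c : Int) :
    pQl x y (PySem.List.pyGetD x r 0) (PySem.List.pyGetD y r 0) r c =
      (pvPt x y c == (PySem.List.pyGetD x r 0 - 1, PySem.List.pyGetD y r 0)) := by
  by_cases h : r = c
  · subst h; simp [pQl, pvPt, Prod.ext_iff]; omega
  · simp only [pQl, pvPt, h, ne_eq, not_false_eq_true, decide_true, Bool.true_and]; rfl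

theorem pQt_eq (x y : List Int) (r c : Int) :
    pQt x y (PySem.List.pyGetD x r 0) (PySem.List.pyGetD y r 0) r c =
      (pvPt x y c == (PySem.List.pyGetD x r 0 + 1, PySem.List.pyGetD y r 0)) := by
  by_cases h : r = c
  · subst h; simp [pQt, pvPt, Prod.ext_iff]
  · simp only [pQt, pvPt, h, ne_eq, not_false_eq_true, decide_true, Bool.true_and]; rfl

-- hπ facts for the four projections
theorem hπa (x y : List Int) (xr yr r : Int) (f : Bool × Bool × Bool × Bool) (c : Int) :
    (pvUpd x y xr yr r f c).1 = (f.1 || pQa x y xr yr r c) := by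
  by_cases h : r = c <;> simp [pvUpd, pQa, h]
theorem hπb (x y : List Int) (xr yr r : Int) (f : Bool × Bool × Bool × Bool) (c : Int) :
    (pvUpd x y xr yr r f c).2.1 = (f.2.1 || pQb x y xr yr r c) := by
  by_cases h : r = c <;> simp [pvUpd, pQb, h]
theorem hπl (x y : List Int) (xr yr r : Int) (f : Bool × Bool × Bool × Bool) (c : Int) :
    (pvUpd x y xr yr r f c).2.2.1 = (f.2.2.1 || pQl x y xr yr r c) := by
  by_cases h : r = c <;> simp [pvUpd, pQl, h]
theorem hπt (x y : List Int) (xr yr r : Int) (f : Bool × Bool × Bool × Bool) (c : Int) :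
    (pvUpd x y xr yr r f c).2.2.2 = (f.2.2.2 || pQt x y xr yr r c) := by
  by_cases h : r = c <;> simp [pvUpd, pQt, h]

-- closed form for the inner count when all four neighbours occur, π1 being the latest direction
theorem pvG_formula (x y : List Int) (xr yr r : Int)
    (π1 π2 π3 π4 : Bool × Bool × Bool × Bool → Bool) (p1 p2 p3 p4 : Int → Bool)
    (hπ1 : ∀ f c, π1 (pvUpd x y xr yr r f c) = (π1 f || p1 c))
    (hπ2 : ∀ f c, π2 (pvUpd x y xr yr r f c) = (π2 f || p2 c))
    (hπ3 : ∀ f c, π3 (pvUpd x y xr yr r f c) = (π3 f || p3 c))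
    (hπ4 : ∀ f c, π4 (pvUpd x y xr yr r f c) = (π4 f || p4 c))
    (himp1 : ∀ f, pvCond f = true → π1 f = true)
    (hcond : ∀ f, π1 f = true → π2 f = true → π3 f = true → π4 f = true → pvCond f = true)
    (hfalse1 : π1 (false, false, false, false) = false)
    (cols m : Int) (hm : 0 ≤ m) (hmc : m < cols)
    (h1 : p1 m = true) (hmin1 : ∀ c, 0 ≤ c → c < m → p1 c = false)
    (h2 : ∃ c, 0 ≤ c ∧ c < m ∧ p2 c = true)
    (h3 : ∃ c, 0 ≤ c ∧ c < m ∧ p3 c = true)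
    (h4 : ∃ c, 0 ≤ c ∧ c < m ∧ p4 c = true) :
    pvG x y xr yr r (false, false, false, false) (PySem.List.pyRange 0 cols 1) = cols - m := by
  rw [PySem.List.pyRange_one_append 0 m cols hm (le_of_lt hmc),
      pvG_append, PySem.List.pyRange_one_cons hmc]
  have hzero : pvG x y xr yr r (false, false, false, false) (PySem.List.pyRange 0 m 1) = 0 := by
    apply pvG_zero x y xr yr r π1 p1 hπ1 himp1 _ _ hfalse1
    intro c hc
    rcases (PySem.List.mem_pyRange_one).mp hc with ⟨h0, hcm⟩
    exact hmin1 c h0 hcm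
  set f1 := (PySem.List.pyRange 0 m 1).foldl (pvUpd x y xr yr r) (false, false, false, false) with hf1
  have hany : ∀ (π : Bool × Bool × Bool × Bool → Bool) (p : Int → Bool),
      (∀ f c, π (pvUpd x y xr yr r f c) = (π f || p c)) →
      (∃ c, 0 ≤ c ∧ c < m ∧ p c = true) → π f1 = true := by
    intro π p hπ ⟨c, hc0, hcm, hpc⟩
    rw [hf1, pvProj_foldl x y xr yr r π p hπ]
    have : (PySem.List.pyRange 0 m 1).any p = true :=
      List.any_eq_true.mpr ⟨c, (PySem.List.mem_pyRange_one).mpr ⟨hc0, hcm⟩, hpc⟩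
    simp [this]
  set f2 := pvUpd x y xr yr r f1 m with hf2
  have hc2 : pvCond f2 = true := by
    apply hcond
    · rw [hf2, hπ1, h1]; simp
    · rw [hf2, hπ2, hany π2 p2 hπ2 h2]; simp
    · rw [hf2, hπ3, hany π3 p3 hπ3 h3]; simp
    · rw [hf2, hπ4, hany π4 p4 hπ4 h4]; simp
  simp only [pvG, hzero, ← hf2, hc2, if_true]
  rw [pvG_sat x y xr yr r _ _ hc2, PySem.List.length_pyRange_one]
  have : ((cols - (m + 1)).toNat : Int) = cols - m - 1 := by omega
  rw [this]; ring

theorem pvG_none_a (x y : List Int) (r N : Int)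
    (h : (PySem.List.pyRange 0 N 1).find? (fun c => pvPt x y c == (PySem.List.pyGetD x r 0, PySem.List.pyGetD y r 0 + 1)) = none) :
    pvG x y (PySem.List.pyGetD x r 0) (PySem.List.pyGetD y r 0) r (false, false, false, false)
      (PySem.List.pyRange 0 N 1) = 0 := by
  apply pvG_zero x y _ _ r (fun f => f.1) (pQa x y (PySem.List.pyGetD x r 0) (PySem.List.pyGetD y r 0) r)
    (hπa x y _ _ r) (by decide) _ _ rfl
  intro c hc
  rw [pQa_eq]
  exact Bool.not_eq_true _ ▸ (List.find?_eq_none.mp h c hc)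

theorem pvG_none_b (x y : List Int) (r N : Int)
    (h : (PySem.List.pyRange 0 N 1).find? (fun c => pvPt x y c == (PySem.List.pyGetD x r 0, PySem.List.pyGetD y r 0 - 1)) = none) :
    pvG x y (PySem.List.pyGetD x r 0) (PySem.List.pyGetD y r 0) r (false, false, false, false)
      (PySem.List.pyRange 0 N 1) = 0 := by
  apply pvG_zero x y _ _ r (fun f => f.2.1) (pQb x y (PySem.List.pyGetD x r 0) (PySem.List.pyGetD y r 0) r)
    (hπb x y _ _ r) (by decide) _ _ rfl
  intro c hc
  rw [pQb_eq]
  exact Bool.not_eq_true _ ▸ (List.find?_eq_none.mp h c hc)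

theorem pvG_none_l (x y : List Int) (r N : Int)
    (h : (PySem.List.pyRange 0 N 1).find? (fun c => pvPt x y c == (PySem.List.pyGetD x r 0 - 1, PySem.List.pyGetD y r 0)) = none) :
    pvG x y (PySem.List.pyGetD x r 0) (PySem.List.pyGetD y r 0) r (false, false, false, false)
      (PySem.List.pyRange 0 N 1) = 0 := by
  apply pvG_zero x y _ _ r (fun f => f.2.2.1) (pQl x y (PySem.List.pyGetD x r 0) (PySem.List.pyGetD y r 0) r)
    (hπl x y _ _ r) (by decide) _ _ rfl
  intro c hc
  rw [pQl_eq]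
  exact Bool.not_eq_true _ ▸ (List.find?_eq_none.mp h c hc)

theorem pvG_none_t (x y : List Int) (r N : Int)
    (h : (PySem.List.pyRange 0 N 1).find? (fun c => pvPt x y c == (PySem.List.pyGetD x r 0 + 1, PySem.List.pyGetD y r 0)) = none) :
    pvG x y (PySem.List.pyGetD x r 0) (PySem.List.pyGetD y r 0) r (false, false, false, false)
      (PySem.List.pyRange 0 N 1) = 0 := by
  apply pvG_zero x y _ _ r (fun f => f.2.2.2) (pQt x y (PySem.List.pyGetD x r 0) (PySem.List.pyGetD y r 0) r)
    (hπt x y _ _ r) (by decide) _ _ rfl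
  intro c hc
  rw [pQt_eq]
  exact Bool.not_eq_true _ ▸ (List.find?_eq_none.mp h c hc)

theorem pvG_some (x y : List Int) (r N : Int) {a b l t : Int}
    (ha : (PySem.List.pyRange 0 N 1).find? (fun c => pvPt x y c == (PySem.List.pyGetD x r 0, PySem.List.pyGetD y r 0 + 1)) = some a)
    (hb : (PySem.List.pyRange 0 N 1).find? (fun c => pvPt x y c == (PySem.List.pyGetD x r 0, PySem.List.pyGetD y r 0 - 1)) = some b)
    (hl : (PySem.List.pyRange 0 N 1).find? (fun c => pvPt x y c == (PySem.List.pyGetD x r 0 - 1, PySem.List.pyGetD y r 0)) = some l)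
    (ht : (PySem.List.pyRange 0 N 1).find? (fun c => pvPt x y c == (PySem.List.pyGetD x r 0 + 1, PySem.List.pyGetD y r 0)) = some t) :
    pvG x y (PySem.List.pyGetD x r 0) (PySem.List.pyGetD y r 0) r (false, false, false, false)
      (PySem.List.pyRange 0 N 1) = N - max (max (max a b) l) t := by
  have hpw := PySem.List.pairwise_lt_pyRange_one 0 N
  have hba := PySem.List.mem_pyRange_one.mp (List.mem_of_find?_eq_some ha)
  have hbb := PySem.List.mem_pyRange_one.mp (List.mem_of_find?_eq_some hb)
  have hbl := PySem.List.mem_pyRange_one.mp (List.mem_of_find?_eq_some hl)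
  have hbt := PySem.List.mem_pyRange_one.mp (List.mem_of_find?_eq_some ht)
  have hpa : pvPt x y a = (PySem.List.pyGetD x r 0, PySem.List.pyGetD y r 0 + 1) := by simpa using List.find?_some ha
  have hpb : pvPt x y b = (PySem.List.pyGetD x r 0, PySem.List.pyGetD y r 0 - 1) := by simpa using List.find?_some hb
  have hpl : pvPt x y l = (PySem.List.pyGetD x r 0 - 1, PySem.List.pyGetD y r 0) := by simpa using List.find?_some hl
  have hpt : pvPt x y t = (PySem.List.pyGetD x r 0 + 1, PySem.List.pyGetD y r 0) := by simpa using List.find?_some ht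
  have hmina := pvFind?_min hpw ha
  have hminb := pvFind?_min hpw hb
  have hminl := pvFind?_min hpw hl
  have hmint := pvFind?_min hpw ht
  have hab : a ≠ b := by intro e; rw [e, hpb] at hpa; simp [Prod.ext_iff] at hpa; omega
  have hal : a ≠ l := by intro e; rw [e, hpl] at hpa; simp [Prod.ext_iff] at hpa
  have hat : a ≠ t := by intro e; rw [e, hpt] at hpa; simp [Prod.ext_iff] at hpa
  have hbl' : b ≠ l := by intro e; rw [e, hpl] at hpb; simp [Prod.ext_iff] at hpb
  have hbt' : b ≠ t := by intro e; rw [e, hpt] at hpb; simp [Prod.ext_iff] at hpb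
  have hlt' : l ≠ t := by intro e; rw [e, hpt] at hpl; simp [Prod.ext_iff] at hpl; omega
  have hchoice : max (max (max a b) l) t = a ∨ max (max (max a b) l) t = b ∨
      max (max (max a b) l) t = l ∨ max (max (max a b) l) t = t := by omega
  rcases hchoice with hm | hm | hm | hm
  · rw [hm]
    apply pvG_formula x y _ _ r (fun f => f.1) (fun f => f.2.1) (fun f => f.2.2.1) (fun f => f.2.2.2)
      (pQa x y _ _ r) (pQb x y _ _ r) (pQl x y _ _ r) (pQt x y _ _ r)
      (hπa x y _ _ r) (hπb x y _ _ r) (hπl x y _ _ r) (hπt x y _ _ r)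
      (by decide) (by decide) rfl N a hba.1 hba.2
    · rw [pQa_eq]; simpa using List.find?_some ha
    · intro c h0 hcm
      rw [pQa_eq]
      exact Bool.not_eq_true _ ▸ hmina c (PySem.List.mem_pyRange_one.mpr ⟨h0, by omega⟩) hcm
    · exact ⟨b, hbb.1, by omega, by rw [pQb_eq]; simpa using List.find?_some hb⟩
    · exact ⟨l, hbl.1, by omega, by rw [pQl_eq]; simpa using List.find?_some hl⟩
    · exact ⟨t, hbt.1, by omega, by rw [pQt_eq]; simpa using List.find?_some ht⟩
  · rw [hm]
    apply pvG_formula x y _ _ r (fun f => f.2.1) (fun f => f.1) (fun f => f.2.2.1) (fun f => f.2.2.2)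
      (pQb x y _ _ r) (pQa x y _ _ r) (pQl x y _ _ r) (pQt x y _ _ r)
      (hπb x y _ _ r) (hπa x y _ _ r) (hπl x y _ _ r) (hπt x y _ _ r)
      (by decide) (by decide) rfl N b hbb.1 hbb.2
    · rw [pQb_eq]; simpa using List.find?_some hb
    · intro c h0 hcm
      rw [pQb_eq]
      exact Bool.not_eq_true _ ▸ hminb c (PySem.List.mem_pyRange_one.mpr ⟨h0, by omega⟩) hcm
    · exact ⟨a, hba.1, by omega, by rw [pQa_eq]; simpa using List.find?_some ha⟩
    · exact ⟨l, hbl.1, by omega, by rw [pQl_eq]; simpa using List.find?_some hl⟩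
    · exact ⟨t, hbt.1, by omega, by rw [pQt_eq]; simpa using List.find?_some ht⟩
  · rw [hm]
    apply pvG_formula x y _ _ r (fun f => f.2.2.1) (fun f => f.1) (fun f => f.2.1) (fun f => f.2.2.2)
      (pQl x y _ _ r) (pQa x y _ _ r) (pQb x y _ _ r) (pQt x y _ _ r)
      (hπl x y _ _ r) (hπa x y _ _ r) (hπb x y _ _ r) (hπt x y _ _ r)
      (by decide) (by decide) rfl N l hbl.1 hbl.2
    · rw [pQl_eq]; simpa using List.find?_some hl
    · intro c h0 hcm
      rw [pQl_eq]
      exact Bool.not_eq_true _ ▸ hminl c (PySem.List.mem_pyRange_one.mpr ⟨h0, by omega⟩) hcm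
    · exact ⟨a, hba.1, by omega, by rw [pQa_eq]; simpa using List.find?_some ha⟩
    · exact ⟨b, hbb.1, by omega, by rw [pQb_eq]; simpa using List.find?_some hb⟩
    · exact ⟨t, hbt.1, by omega, by rw [pQt_eq]; simpa using List.find?_some ht⟩
  · rw [hm]
    apply pvG_formula x y _ _ r (fun f => f.2.2.2) (fun f => f.1) (fun f => f.2.1) (fun f => f.2.2.1)
      (pQt x y _ _ r) (pQa x y _ _ r) (pQb x y _ _ r) (pQl x y _ _ r)
      (hπt x y _ _ r) (hπa x y _ _ r) (hπb x y _ _ r) (hπl x y _ _ r)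
      (by decide) (by decide) rfl N t hbt.1 hbt.2
    · rw [pQt_eq]; simpa using List.find?_some ht
    · intro c h0 hcm
      rw [pQt_eq]
      exact Bool.not_eq_true _ ▸ hmint c (PySem.List.mem_pyRange_one.mpr ⟨h0, by omega⟩) hcm
    · exact ⟨a, hba.1, by omega, by rw [pQa_eq]; simpa using List.find?_some ha⟩
    · exact ⟨b, hbb.1, by omega, by rw [pQb_eq]; simpa using List.find?_some hb⟩
    · exact ⟨l, hbl.1, by omega, by rw [pQl_eq]; simpa using List.find?_some hl⟩

-- A as a sum of row contributions
theorem pvA_sum (x y : List Int) (h : x.length = y.length) :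
    numIdleDrives x y = ((PySem.List.pyRange 0 (y.length : Int) 1).map (pvCA x y)).sum := by
  have hxy : ((x.length : Int)) = ((y.length : Int)) := by exact_mod_cast h
  unfold numIdleDrives
  rw [hxy]
  rw [PySem.List.foldl_congr_mem (g := fun idle r => idle + pvCA x y r)]
  · rw [PySem.List.foldl_add]; ring
  · intro idle r _
    show (List.foldl (pvAStep x y (PySem.List.pyGetD x r 0) (PySem.List.pyGetD y r 0) r)
      ((false, false, false, false), idle) (PySem.List.pyRange 0 (y.length : Int) 1)).2 =
      idle + pvCA x y r
    rw [pvFold_eq]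
    unfold pvCA pvFind pvPt
    rcases h1 : (PySem.List.pyRange 0 (y.length : Int) 1).find?
        (fun c => pvPt x y c == (PySem.List.pyGetD x r 0, PySem.List.pyGetD y r 0 + 1)) with _ | a <;>
      rcases h2 : (PySem.List.pyRange 0 (y.length : Int) 1).find?
        (fun c => pvPt x y c == (PySem.List.pyGetD x r 0, PySem.List.pyGetD y r 0 - 1)) with _ | b <;>
      rcases h3 : (PySem.List.pyRange 0 (y.length : Int) 1).find?
        (fun c => pvPt x y c == (PySem.List.pyGetD x r 0 - 1, PySem.List.pyGetD y r 0)) with _ | l <;>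
      rcases h4 : (PySem.List.pyRange 0 (y.length : Int) 1).find?
        (fun c => pvPt x y c == (PySem.List.pyGetD x r 0 + 1, PySem.List.pyGetD y r 0)) with _ | t <;>
      simp only [pvPt] at h1 h2 h3 h4 <;>
      first
        | (rw [pvG_none_a x y r _ h1]; simp [h1, h2, h3, h4])
        | (rw [pvG_none_b x y r _ h2]; simp [h1, h2, h3, h4])
        | (rw [pvG_none_l x y r _ h3]; simp [h1, h2, h3, h4])
        | (rw [pvG_none_t x y r _ h4]; simp [h1, h2, h3, h4])
        | (rw [pvG_some x y r _ h1 h2 h3 h4]; simp [h1, h2, h3, h4])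

-- the row-index range maps onto the zipped position list
theorem pvMapRange (x y : List Int) (h : x.length = y.length) :
    (PySem.List.pyRange 0 (y.length : Int) 1).map (pvPt x y) = x.zip y := by
  apply List.ext_getElem
  · rw [List.length_map, PySem.List.length_pyRange_one, List.length_zip, h]; omega
  · intro k hk1 hk2
    rw [List.length_map, PySem.List.length_pyRange_one] at hk1
    have hky : k < y.length := by omega
    have hkx : k < x.length := by omega
    rw [List.getElem_map, PySem.List.getElem_pyRange_one, List.getElem_zip]
    have : (0 : Int) + (k : Int) = ((k : Nat) : Int) := by omega
    rw [this]
    unfold pvPt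
    rw [PySem.List.pyGetD_natCast, PySem.List.pyGetD_natCast, List.getD_eq_getElem _ _ hkx,
      List.getD_eq_getElem _ _ hky]

-- pvFind is some exactly on the positions present in the zipped list
theorem pvFind_isSome (x y : List Int) (h : x.length = y.length) (q : Int × Int) :
    (pvFind x y q).isSome = true ↔ q ∈ x.zip y := by
  unfold pvFind
  rw [List.find?_isSome]
  constructor
  · rintro ⟨c, hc, hpc⟩
    have := eq_of_beq hpc
    rw [← this, ← pvMapRange x y h]
    exact List.mem_map_of_mem hc
  · intro hq
    rw [← pvMapRange x y h] at hq
    rcases List.mem_map.mp hq with ⟨c, hc, hpc⟩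
    exact ⟨c, hc, by rw [hpc]; simp⟩

-- a found index that is not among the first len-1 positions must be the last index
theorem pvFind_last (x y : List Int) (h : x.length = y.length) (q : Int × Int) (v : Int)
    (hv : pvFind x y q = some v) (hnd : q ∉ (x.zip y).dropLast) : v = (y.length : Int) - 1 := by
  have hmem := PySem.List.mem_pyRange_one.mp (List.mem_of_find?_eq_some hv)
  have hpv : pvPt x y v = q := eq_of_beq (by simpa using List.find?_some hv)
  by_contra hne
  have hvlt : v < (y.length : Int) - 1 := by omega
  apply hnd
  have hvx : v.toNat < x.length := by omega
  have hvy : v.toNat < y.length := by omega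
  have hq : (x.zip y)[v.toNat]'(by rw [List.length_zip]; omega) = q := by
    rw [List.getElem_zip, ← hpv]
    unfold pvPt
    rw [PySem.List.pyGetD_of_nonneg x 0 (by omega), PySem.List.pyGetD_of_nonneg y 0 (by omega),
      List.getD_eq_getElem _ _ hvx, List.getD_eq_getElem _ _ hvy]
  have hlen : v.toNat < (x.zip y).dropLast.length := by
    rw [List.length_dropLast, List.length_zip]; omega
  exact List.mem_iff_getElem.mpr ⟨v.toNat, hlen, by rw [List.getElem_dropLast]; exact hq⟩

-- a position among the first len-1 positions is found at an index below len-1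
theorem pvFind_early (x y : List Int) (h : x.length = y.length) (q : Int × Int)
    (hq : q ∈ (x.zip y).dropLast) :
    ∃ v, pvFind x y q = some v ∧ 0 ≤ v ∧ v < (y.length : Int) - 1 := by
  rcases List.mem_iff_getElem.mp hq with ⟨k, hk, hkq⟩
  have hk' : k < (x.zip y).length - 1 := by
    rw [List.length_dropLast] at hk; omega
  rw [List.length_zip] at hk'
  have hkx : k < x.length := by omega
  have hky : k < y.length := by omega
  rw [List.getElem_dropLast] at hkq
  have hpk : pvPt x y (k : Int) = q := by
    rw [← hkq, List.getElem_zip]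
    unfold pvPt
    rw [PySem.List.pyGetD_natCast, PySem.List.pyGetD_natCast,
      List.getD_eq_getElem _ _ hkx, List.getD_eq_getElem _ _ hky]
  have hmemk : (k : Int) ∈ PySem.List.pyRange 0 (y.length : Int) 1 :=
    PySem.List.mem_pyRange_one.mpr ⟨by omega, by omega⟩
  have hsome : (pvFind x y q).isSome = true := by
    unfold pvFind
    rw [List.find?_isSome]
    exact ⟨(k : Int), hmemk, by rw [hpk]; simp⟩
  rcases Option.isSome_iff_exists.mp hsome with ⟨v, hv⟩
  have hvb := PySem.List.mem_pyRange_one.mp (List.mem_of_find?_eq_some hv)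
  refine ⟨v, hv, hvb.1, ?_⟩
  have hmin := pvFind?_min (PySem.List.pairwise_lt_pyRange_one 0 (y.length : Int)) hv
  by_contra hge
  have hkv : (k : Int) < v := by omega
  have := hmin (k : Int) hmemk hkv
  rw [hpk] at this
  simp at this

-- B as a sum of row contributions over the same range
theorem pvB_sum (x y : List Int) (h : x.length = y.length) :
    numIdleDrives_alt x y = ((PySem.List.pyRange 0 (y.length : Int) 1).map (pvCB x y)).sum := by
  have step : numIdleDrives_alt x y =
      (x.zip y).foldl (fun idle p => idle +
        (if PySem.Set.contains (PySem.Set.ofList (x.zip y)) (p.1, p.2 + 1) &&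
            PySem.Set.contains (PySem.Set.ofList (x.zip y)) (p.1, p.2 - 1) &&
            PySem.Set.contains (PySem.Set.ofList (x.zip y)) (p.1 - 1, p.2) &&
            PySem.Set.contains (PySem.Set.ofList (x.zip y)) (p.1 + 1, p.2)
         then 1 else 0)) 0 := by
    simp only [numIdleDrives_alt]
    exact PySem.List.foldl_congr_mem _ _ _ _ (by intro acc p _; split <;> simp)
  rw [step]
  rw [PySem.List.foldl_add, ← pvMapRange x y h, List.map_map]
  rw [zero_add]
  congr 1
  apply List.map_congr_left
  intro r hr
  simp only [Function.comp_apply]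
  have hcget : ∀ q : Int × Int,
      PySem.Set.contains (PySem.Set.ofList ((PySem.List.pyRange 0 (y.length : Int) 1).map (pvPt x y))) q
        = (pvFind x y q).isSome := by
    intro q
    rw [pvMapRange x y h]
    rcases hs : (pvFind x y q).isSome with _ | _
    · have : q ∉ x.zip y := fun hm => by
        rw [(pvFind_isSome x y h q).mpr hm] at hs; cases hs
      simp [PySem.Set.mem_ofList, this]
    · have : q ∈ x.zip y := (pvFind_isSome x y h q).mp hs
      simp [PySem.Set.mem_ofList, this]
  simp only [hcget]
  unfold pvCB
  rcases h1 : pvFind x y ((pvPt x y r).1, (pvPt x y r).2 + 1) with _ | a <;>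
    rcases h2 : pvFind x y ((pvPt x y r).1, (pvPt x y r).2 - 1) with _ | b <;>
    rcases h3 : pvFind x y ((pvPt x y r).1 - 1, (pvPt x y r).2) with _ | l <;>
    rcases h4 : pvFind x y ((pvPt x y r).1 + 1, (pvPt x y r).2) with _ | t <;>
    simp

-- bounds on a found index
theorem pvFind_bounds (x y : List Int) (q : Int × Int) (v : Int) (hv : pvFind x y q = some v) :
    0 ≤ v ∧ v < (y.length : Int) :=
  PySem.List.mem_pyRange_one.mp (List.mem_of_find?_eq_some hv)

-- pointwise: B's contribution never exceeds A's
theorem pvCB_le_pvCA (x y : List Int) (r : Int) : pvCB x y r ≤ pvCA x y r := by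
  unfold pvCA pvCB
  rcases h1 : pvFind x y ((pvPt x y r).1, (pvPt x y r).2 + 1) with _ | a <;>
    rcases h2 : pvFind x y ((pvPt x y r).1, (pvPt x y r).2 - 1) with _ | b <;>
    rcases h3 : pvFind x y ((pvPt x y r).1 - 1, (pvPt x y r).2) with _ | l <;>
    rcases h4 : pvFind x y ((pvPt x y r).1 + 1, (pvPt x y r).2) with _ | t <;>
    simp only [] <;> try omega
  have b1 := pvFind_bounds x y _ _ h1
  have b2 := pvFind_bounds x y _ _ h2
  have b3 := pvFind_bounds x y _ _ h3
  have b4 := pvFind_bounds x y _ _ h4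
  omega

-- sums of pointwise-dominated maps, strict at one member
theorem pvSum_lt {f g : Int → Int} :
    ∀ (l : List Int), (∀ r ∈ l, g r ≤ f r) → (∃ r ∈ l, g r < f r) →
      (l.map g).sum < (l.map f).sum
  | [], _, h => by simp at h
  | c :: cs, hle, hlt => by
      simp only [List.map_cons, List.sum_cons]
      rcases hlt with ⟨r, hr, hrlt⟩
      rcases List.mem_cons.mp hr with rfl | hrcs
      · have hrest : (cs.map g).sum ≤ (cs.map f).sum :=
          List.sum_le_sum (fun b hb => hle b (List.mem_cons_of_mem _ hb))
        omega
      · have hhead := hle c List.mem_cons_self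
        have := pvSum_lt cs (fun r' hr' => hle r' (List.mem_cons_of_mem _ hr'))
          ⟨r, hrcs, hrlt⟩
        omega

-- D_'s offset test for one position, as the four neighbour memberships
theorem pvDbody (x y : List Int) (p : Int × Int) :
    (∀ o ∈ [((1 : Int), 0), (0, 1)],
        [p + o, p - o] ⊆ (x.zip y).dropLast) ↔
      ((p.1, p.2 + 1) ∈ (x.zip y).dropLast ∧ (p.1, p.2 - 1) ∈ (x.zip y).dropLast ∧
       (p.1 - 1, p.2) ∈ (x.zip y).dropLast ∧ (p.1 + 1, p.2) ∈ (x.zip y).dropLast) := by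
  have e1 : p + ((1 : Int), (0 : Int)) = (p.1 + 1, p.2) := by cases p; simp
  have e2 : p - ((1 : Int), (0 : Int)) = (p.1 - 1, p.2) := by cases p; simp
  have e3 : p + ((0 : Int), (1 : Int)) = (p.1, p.2 + 1) := by cases p; simp
  have e4 : p - ((0 : Int), (1 : Int)) = (p.1, p.2 - 1) := by cases p; simp
  constructor
  · intro hall
    have h1 := hall ((1 : Int), 0) (by simp)
    have h2 := hall ((0 : Int), 1) (by simp)
    simp only [List.cons_subset, List.nil_subset, and_true, e1, e2, e3, e4] at h1 h2
    exact ⟨h2.1, h2.2, h1.2, h1.1⟩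
  · rintro ⟨m1, m2, m3, m4⟩ o ho
    rcases List.mem_cons.mp ho with rfl | ho'
    · simp only [List.cons_subset, List.nil_subset, and_true, e1, e2]
      exact ⟨m4, m3⟩
    · rcases List.mem_cons.mp ho' with rfl | ho''
      · simp only [List.cons_subset, List.nil_subset, and_true, e3, e4]
        exact ⟨m1, m2⟩
      · simp at ho''

-- ¬D_: every surrounded row has its latest neighbour first-seen at the last index
theorem pvCA_eq_pvCB_of_notD (x y : List Int) (h : x.length = y.length)
    (hnd : ¬ D_numIdleDrives x y) (r : Int) (hr : r ∈ PySem.List.pyRange 0 (y.length : Int) 1) :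
    pvCA x y r = pvCB x y r := by
  unfold pvCA pvCB
  rcases h1 : pvFind x y ((pvPt x y r).1, (pvPt x y r).2 + 1) with _ | a <;>
    rcases h2 : pvFind x y ((pvPt x y r).1, (pvPt x y r).2 - 1) with _ | b <;>
    rcases h3 : pvFind x y ((pvPt x y r).1 - 1, (pvPt x y r).2) with _ | l <;>
    rcases h4 : pvFind x y ((pvPt x y r).1 + 1, (pvPt x y r).2) with _ | t <;>
    simp only []
  -- all four some: show the max equals len - 1
  have hmem : pvPt x y r ∈ x.zip y := by
    rw [← pvMapRange x y h]; exact List.mem_map_of_mem hr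
  have hnall : ¬ (((pvPt x y r).1, (pvPt x y r).2 + 1) ∈ (x.zip y).dropLast ∧
      ((pvPt x y r).1, (pvPt x y r).2 - 1) ∈ (x.zip y).dropLast ∧
      ((pvPt x y r).1 - 1, (pvPt x y r).2) ∈ (x.zip y).dropLast ∧
      ((pvPt x y r).1 + 1, (pvPt x y r).2) ∈ (x.zip y).dropLast) := by
    intro hall
    exact hnd ⟨pvPt x y r, hmem, (pvDbody x y (pvPt x y r)).mpr hall⟩
  have hor : ¬ ((pvPt x y r).1, (pvPt x y r).2 + 1) ∈ (x.zip y).dropLast ∨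
      ¬ ((pvPt x y r).1, (pvPt x y r).2 - 1) ∈ (x.zip y).dropLast ∨
      ¬ ((pvPt x y r).1 - 1, (pvPt x y r).2) ∈ (x.zip y).dropLast ∨
      ¬ ((pvPt x y r).1 + 1, (pvPt x y r).2) ∈ (x.zip y).dropLast := by tauto
  have b1 := pvFind_bounds x y _ _ h1
  have b2 := pvFind_bounds x y _ _ h2
  have b3 := pvFind_bounds x y _ _ h3
  have b4 := pvFind_bounds x y _ _ h4
  have hlast : a = (y.length : Int) - 1 ∨ b = (y.length : Int) - 1 ∨
      l = (y.length : Int) - 1 ∨ t = (y.length : Int) - 1 := by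
    rcases hor with hm | hm | hm | hm
    · exact Or.inl (pvFind_last x y h _ _ h1 hm)
    · exact Or.inr (Or.inl (pvFind_last x y h _ _ h2 hm))
    · exact Or.inr (Or.inr (Or.inl (pvFind_last x y h _ _ h3 hm)))
    · exact Or.inr (Or.inr (Or.inr (pvFind_last x y h _ _ h4 hm)))
  omega

-- D_: some row has all four neighbours first-seen strictly before the last index
theorem pvD_strict (x y : List Int) (h : x.length = y.length) (hd : D_numIdleDrives x y) :
    ∃ r ∈ PySem.List.pyRange 0 (y.length : Int) 1, pvCB x y r < pvCA x y r := by
  rcases hd with ⟨p, hp, hall⟩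
  rw [← pvMapRange x y h] at hp
  rcases List.mem_map.mp hp with ⟨r, hr, hpr⟩
  refine ⟨r, hr, ?_⟩
  rcases (pvDbody x y p).mp hall with ⟨m1, m2, m3, m4⟩
  rcases pvFind_early x y h _ m1 with ⟨a, ha, hab⟩
  rcases pvFind_early x y h _ m2 with ⟨b, hb, hbb⟩
  rcases pvFind_early x y h _ m3 with ⟨l, hl, hlb⟩
  rcases pvFind_early x y h _ m4 with ⟨t, ht, htb⟩
  unfold pvCA pvCB
  rw [hpr, ha, hb, hl, ht]
  simp only []
  omega

-- ===== VERDICT (by name: the statement is the Claim_ definition above) =====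
theorem numIdleDrives_spec : Claim_unchanged_numIdleDrives := by
  intro x y _ hpre hnd
  rcases hpre with h | h
  · rw [pvA_sum x y h, pvB_sum x y h]
    congr 1
    exact List.map_congr_left (fun r hr => pvCA_eq_pvCB_of_notD x y h hnd r hr)
  · subst h; rfl

theorem numIdleDrives_changed : Claim_changed_numIdleDrives := by
  unfold Claim_changed_numIdleDrives; decide

theorem numIdleDrives_tight : Claim_exact_numIdleDrives := by
  intro x y _ hpre hd
  rcases hpre with h | h
  · rw [pvA_sum x y h, pvB_sum x y h]
    have := pvSum_lt (f := pvCA x y) (g := pvCB x y)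
      (PySem.List.pyRange 0 (y.length : Int) 1)
      (fun r _ => pvCB_le_pvCA x y r) (pvD_strict x y h hd)
    omega
  · subst h
    exact absurd hd (by simp [D_numIdleDrives])
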